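-- pv_equiv track=rewrite | github.com/DIGI-UW/analyzer-mock-server | test_hl7.py | _segment_map
-- ===== SOURCE A (Python) =====
-- def _segments(msg: str):
--     """Split HL7 message into segments (\\r or \\n)."""
--     return [s.strip() for s in msg.replace("\r", "\n").split("\n") if s.strip()]
--
-- def _segment_map(msg: str):
--     """Return dict of segment_type -> list of segment rows (first segment type only for multi)."""
--     segs = _segments(msg)
--     out = {}
--     for s in segs:
--         if "|" not in s:
--             continue
--         seg_type = s.split("|", 1)[0]
--         if seg_type not in out:
--             out[seg_type] = []
--         out[seg_type].append(s)
--     return out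
-- ===== SOURCE B (Python) =====
-- def _segments(msg: str):
--     """Split HL7 message into segments (\\r or \\n)."""
--     return [s.strip() for s in msg.replace("\r", "\n").split("\n") if s.strip()]
--
-- def _segment_map(msg: str):
--     """Return dict of segment_type -> list of segment rows (first segment type only for multi)."""
--     rows = [(s.split("|", 1)[0], s) for s in _segments(msg) if "|" in s]
--     return {t: [s for u, s in rows if u == t] for t, _ in rows}
-- ===== Notes on version B (the rewrite author's own statement) =====
-- stated objective: alternative
-- what changed: Replaces the incremental dict-building loop (membership test, empty-list init, append) with a declarative two-phase form: one pass extracting (type, row) pairs, then a dict comprehension that gathers each type's rows by a filtering scan of the pair list.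
import Mathlib
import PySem

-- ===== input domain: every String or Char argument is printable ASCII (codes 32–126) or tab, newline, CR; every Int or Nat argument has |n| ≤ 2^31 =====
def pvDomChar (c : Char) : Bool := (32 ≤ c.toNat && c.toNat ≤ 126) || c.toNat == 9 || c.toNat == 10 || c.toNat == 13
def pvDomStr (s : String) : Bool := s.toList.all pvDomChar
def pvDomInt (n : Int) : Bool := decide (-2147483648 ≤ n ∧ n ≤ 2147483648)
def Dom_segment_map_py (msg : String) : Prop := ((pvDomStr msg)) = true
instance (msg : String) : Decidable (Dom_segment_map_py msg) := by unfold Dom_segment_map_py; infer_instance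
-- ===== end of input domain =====

-- B replaces A's incremental dict-building loop with a pair-extraction pass followed by a
-- per-type gathering comprehension (alternative decomposition, same return value).

-- ===== PORT A =====
-- shared helper: the Python helper _segments (used verbatim by both A and B)
def pySegments (msg : String) : List String :=
  ((PySem.Str.split? (PySem.Str.replace msg "\r" "\n") "\n").getD []).filterMap
    (fun s => let t := PySem.Str.strip s; if t = "" then none else some t)

-- shared helper: s.split("|", 1)[0]
def pvKey (s : String) : String := ((PySem.Str.splitMax? s "|" 1).getD []).headD ""

def segment_map_py (msg : String) : List (String × List String) :=
  let segs := pySegments msg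
  (segs.foldl (fun out s =>
      if PySem.Str.isIn "|" s = false then out
      else
        let t := pvKey s
        let out' := if out.contains t then out else out.insert t ([] : List String)
        out'.modify t [] (fun l => l ++ [s]))
    PySem.Dict.empty).items

-- ===== PORT B =====
def segment_map_py_alt (msg : String) : List (String × List String) :=
  let rows := (pySegments msg).filterMap
    (fun s => if PySem.Str.isIn "|" s then some (pvKey s, s) else none)
  (rows.foldl (fun d p =>
      d.insert p.1 ((rows.filter (fun q => q.1 == p.1)).map Prod.snd))
    PySem.Dict.empty).items

-- ===== PRECONDITION & SPEC =====
def Spec_segment_map_py (msg : String) (out : List (String × List String)) : Prop := out = segment_map_py_alt msg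
instance (msg : String) (out : List (String × List String)) : Decidable (Spec_segment_map_py msg out) := by unfold Spec_segment_map_py; infer_instance

-- ===== CLAIM (what is proved, stated in full; the proofs are below) =====
def Claim_equal_segment_map_py : Prop := ∀ (msg : String), Dom_segment_map_py msg → Spec_segment_map_py msg (segment_map_py msg)

-- ===== LEMMAS AND PROOFS =====

-- the group of rows carrying key t (the value B's comprehension computes per key)
def pvGrp (rows : List (String × String)) (t : String) : List String :=
  (rows.filter (fun q => q.1 == t)).map Prod.snd

-- A's loop body, on a (key, row) pair
def pvStepA (d : PySem.Dict String (List String)) (p : String × String) :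
    PySem.Dict String (List String) :=
  (if d.contains p.1 then d else d.insert p.1 ([] : List String)).modify p.1 [] (fun l => l ++ [p.2])

-- A's fold over the segments is the fold of pvStepA over the extracted (key, row) pairs
theorem foldA_eq_rows (segs : List String) (d : PySem.Dict String (List String)) :
    segs.foldl (fun out s =>
      if PySem.Str.isIn "|" s = false then out
      else
        let t := pvKey s
        let out' := if out.contains t then out else out.insert t ([] : List String)
        out'.modify t [] (fun l => l ++ [s])) d
    = (segs.filterMap (fun s => if PySem.Str.isIn "|" s then some (pvKey s, s) else none)).foldl
        pvStepA d := by
  induction segs generalizing d with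
  | nil => rfl
  | cons s rest ih =>
    rw [List.foldl_cons, List.filterMap_cons]
    cases h : PySem.Str.isIn "|" s
    · simp only [reduceIte]
      exact ih d
    · simp only [reduceIte, List.foldl_cons]
      exact ih _

theorem grp_append (rows : List (String × String)) (p : String × String) (t : String) :
    pvGrp (rows ++ [p]) t = pvGrp rows t ++ (if p.1 == t then [p.2] else []) := by
  unfold pvGrp
  rw [List.filter_append, List.map_append]
  congr 1
  by_cases h : p.1 = t
  · subst h; simp
  · simp [h]

-- A's fold produces the canonical grouping: keys in first-occurrence order, each with its group
theorem foldA_canon (rows : List (String × String)) :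
    (rows.foldl pvStepA PySem.Dict.empty).items
      = (PySem.Set.ofList (rows.map Prod.fst)).map (fun t => (t, pvGrp rows t)) := by
  induction rows using List.reverseRecOn with
  | nil => rfl
  | append_singleton rows p ih =>
    rw [List.foldl_append, List.foldl_cons, List.foldl_nil]
    simp only [List.map_append, List.map_cons, List.map_nil]
    set d := rows.foldl pvStepA PySem.Dict.empty with hd
    have hit : d.items = (PySem.Set.ofList (rows.map Prod.fst)).map (fun t => (t, pvGrp rows t)) := ih
    have hks : d.keys = PySem.Set.ofList (rows.map Prod.fst) := by
      rw [PySem.Dict.keys, hit, List.map_map]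
      simp [Function.comp_def]
    have hnd : d.keys.Nodup := by rw [hks]; exact PySem.Set.nodup_ofList _
    have hofl : PySem.Set.ofList (rows.map Prod.fst ++ [p.1])
        = PySem.Set.add (PySem.Set.ofList (rows.map Prod.fst)) p.1 := by
      simp [PySem.Set.ofList, List.foldl_append]
    have hgrp : ∀ t, pvGrp (rows ++ [p]) t = pvGrp rows t ++ (if p.1 == t then [p.2] else []) :=
      grp_append rows p
    by_cases hc : d.contains p.1 = true
    · have hmem : p.1 ∈ PySem.Set.ofList (rows.map Prod.fst) := by
        rw [← hks]; exact (PySem.Dict.contains_iff_mem_keys _ _).mp hc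
      have hget : d.get? p.1 = some (pvGrp rows p.1) := by
        apply PySem.Dict.get?_of_mem_items
        · rw [hit]; exact List.mem_map_of_mem hmem
        · exact hnd
      rw [pvStepA, if_pos hc, PySem.Dict.modify, PySem.Dict.getD, hget, Option.getD_some]
      rw [PySem.Dict.items_insert_of_contains _ _ hc, hit, hofl]
      rw [PySem.Set.add, if_pos (by simpa [PySem.Set.contains_iff] using hmem)]
      rw [List.map_map]
      apply List.map_congr_left
      intro t _
      by_cases h : t = p.1
      · subst h; simp [hgrp]
      · simp [Function.comp, h, beq_iff_eq, hgrp, Ne.symm h]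
    · have hmem : p.1 ∉ PySem.Set.ofList (rows.map Prod.fst) := by
        rw [← hks]
        intro hmm
        exact hc ((PySem.Dict.contains_iff_mem_keys _ _).mpr hmm)
      have hgrp0 : pvGrp rows p.1 = [] := by
        rw [pvGrp, List.filter_eq_nil_iff.mpr, List.map_nil]
        intro q hq hbeq
        apply hmem
        rw [PySem.Set.mem_ofList]
        have hq1 : q.1 = p.1 := by simpa using hbeq
        exact hq1 ▸ List.mem_map_of_mem hq
      have hcF : d.contains p.1 = false := by simpa using hc
      have hc' : (d.insert p.1 ([] : List String)).contains p.1 = true := by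
        simp
      have hget' : (d.insert p.1 ([] : List String)).get? p.1 = some [] :=
        PySem.Dict.get?_insert_self _ _ _
      rw [pvStepA, if_neg hc, PySem.Dict.modify, PySem.Dict.getD, hget', Option.getD_some]
      rw [PySem.Dict.items_insert_of_contains _ _ hc']
      rw [PySem.Dict.items_insert_of_not_contains _ _ hcF, hit]
      rw [List.map_append, List.map_map, hofl]
      rw [PySem.Set.add, if_neg (by simpa [PySem.Set.contains_iff] using hmem)]
      rw [List.map_append]
      congr 1
      · apply List.map_congr_left
        intro t ht
        have : t ≠ p.1 := fun h => hmem (h ▸ ht)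
        simp [Function.comp, this, beq_iff_eq, hgrp, Ne.symm this]
      · simp [hgrp, hgrp0]

-- B's fold of key-determined inserts produces the same canonical form
theorem foldB_canon (rows : List (String × String)) (v : String → List String) :
    (rows.foldl (fun d p => d.insert p.1 (v p.1)) PySem.Dict.empty).items
      = (PySem.Set.ofList (rows.map Prod.fst)).map (fun t => (t, v t)) := by
  induction rows using List.reverseRecOn with
  | nil => rfl
  | append_singleton rows p ih =>
    rw [List.foldl_append, List.foldl_cons, List.foldl_nil, List.map_append]
    simp only [List.map_cons, List.map_nil]
    set d := rows.foldl (fun d p => d.insert p.1 (v p.1)) PySem.Dict.empty with hd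
    have hit : d.items = (PySem.Set.ofList (rows.map Prod.fst)).map (fun t => (t, v t)) := ih
    have hks : d.keys = PySem.Set.ofList (rows.map Prod.fst) := by
      rw [PySem.Dict.keys, hit, List.map_map]
      simp [Function.comp_def]
    have hofl : PySem.Set.ofList (rows.map Prod.fst ++ [p.1])
        = PySem.Set.add (PySem.Set.ofList (rows.map Prod.fst)) p.1 := by
      simp [PySem.Set.ofList, List.foldl_append]
    by_cases hc : d.contains p.1 = true
    · have hmem : p.1 ∈ PySem.Set.ofList (rows.map Prod.fst) := by
        rw [← hks]; exact (PySem.Dict.contains_iff_mem_keys _ _).mp hc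
      rw [PySem.Dict.items_insert_of_contains _ _ hc, hit, hofl]
      rw [PySem.Set.add, if_pos (by simpa [PySem.Set.contains_iff] using hmem)]
      rw [List.map_map]
      apply List.map_congr_left
      intro t _
      by_cases h : t = p.1
      · subst h; simp
      · simp [Function.comp, h, beq_iff_eq]
    · have hmem : p.1 ∉ PySem.Set.ofList (rows.map Prod.fst) := by
        rw [← hks]
        intro hmm
        exact hc ((PySem.Dict.contains_iff_mem_keys _ _).mpr hmm)
      rw [PySem.Dict.items_insert_of_not_contains _ _ (by simpa using hc), hit, hofl]
      rw [PySem.Set.add, if_neg (by simpa [PySem.Set.contains_iff] using hmem)]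
      simp

-- ===== VERDICT (by name: the statement is the Claim_ definition above) =====
theorem segment_map_py_spec : Claim_equal_segment_map_py := by
  intro msg _
  show segment_map_py msg = segment_map_py_alt msg
  simp only [segment_map_py, segment_map_py_alt]
  rw [foldA_eq_rows, foldA_canon]
  simp only [pvGrp]
  exact (foldB_canon _ _).symm
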